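-- pv_equiv track=rewrite | github.com/MeanderingProgrammer/advent-of-code | 2018/23/solver.py | split_bounds
-- ===== SOURCE A (Python) =====
-- import math
--
-- def split_bounds(bounds, value):
--     step_sizes = [math.ceil((bound[1] - bound[0]) / value) for bound in bounds]
--     x_bounds, y_bounds, z_bounds = [], [], []
--     for i in range(value):
--         bound_starts = [(bound[0] + (i * step_sizes[j])) for j, bound in enumerate(bounds)]
--         bound_splits = [(bound_start, bound_start + step_sizes[j]) for j, bound_start in enumerate(bound_starts)]
--
--         x_bounds.append(bound_splits[0])
--         y_bounds.append(bound_splits[1])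
--         z_bounds.append(bound_splits[2])
--
--     return x_bounds, y_bounds, z_bounds
-- ===== SOURCE B (Python) =====
-- def split_bounds(bounds, value):
--     def axis(bound):
--         lo, hi = bound
--         step = -((lo - hi) // value)  # ceil((hi - lo) / value) via integer floor division
--         edges = [lo]
--         for _ in range(value):
--             edges.append(edges[-1] + step)
--         return list(zip(edges, edges[1:]))
--     return axis(bounds[0]), axis(bounds[1]), axis(bounds[2])
-- ===== Notes on version B (the rewrite author's own statement) =====
-- stated objective: faster
-- what changed: B builds, per axis, the list of value+1 cut points by repeated addition of the step (a running cursor) and pairs consecutive cut points with zip, instead of A's single loop over range(value) that rebuilds full per-bound start/split lists of length len(bounds) every iteration and indexes out entries 0/1/2; this drops the per-iteration O(len(bounds)) rebuild, and ceil division is pure integer arithmetic instead of float division plus math.ceil.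
-- outside the precondition, e.g. on split_bounds([(0, 5)], -2): A returns ([], [], []), B raises IndexError; on split_bounds([], 0): A returns ([], [], []), B raises IndexError
import Mathlib
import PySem

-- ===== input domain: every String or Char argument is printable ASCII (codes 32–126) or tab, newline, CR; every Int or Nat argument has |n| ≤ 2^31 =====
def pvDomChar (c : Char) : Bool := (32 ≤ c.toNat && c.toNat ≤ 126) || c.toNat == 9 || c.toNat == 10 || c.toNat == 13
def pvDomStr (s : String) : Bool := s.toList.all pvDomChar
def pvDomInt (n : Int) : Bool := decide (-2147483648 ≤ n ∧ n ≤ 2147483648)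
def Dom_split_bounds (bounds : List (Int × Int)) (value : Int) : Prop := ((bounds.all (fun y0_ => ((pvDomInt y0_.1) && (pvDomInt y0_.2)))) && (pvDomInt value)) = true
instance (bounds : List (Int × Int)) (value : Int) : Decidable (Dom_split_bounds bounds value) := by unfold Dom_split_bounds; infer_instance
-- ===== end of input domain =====

-- B replaces A's indexed fan-out loop by a per-axis running-cursor edge list paired with zip
-- (integer ceil division instead of float division plus math.ceil); return-value equivalence.

-- ===== PORT A =====
-- math.ceil(a / v): exact as integer ceiling division on the stated domain (|a| ≤ 2^33 < 2^53,
-- so the float quotient rounds to an integer only when the true quotient is one).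
def pvCeilTrueDiv (a v : Int) : Int := -(PySem.Int.floordiv (-a) v)

-- loop body of A's 'for i in range(value)'; bound_splits[k] ported with pyGetD, exact under
-- Pre_ (len(bounds) ≥ 3, so the Python indexing never raises there)
def splitBoundsBody (bounds : List (Int × Int)) (stepSizes : List Int)
    (acc : (List (Int × Int)) × (List (Int × Int)) × (List (Int × Int))) (i : Int) :
    (List (Int × Int)) × (List (Int × Int)) × (List (Int × Int)) :=
  let boundStarts := (PySem.List.enumerate bounds).map
    (fun jb => jb.2.1 + i * PySem.List.pyGetD stepSizes jb.1 0)
  let boundSplits := (PySem.List.enumerate boundStarts).map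
    (fun js => (js.2, js.2 + PySem.List.pyGetD stepSizes js.1 0))
  (acc.1 ++ [PySem.List.pyGetD boundSplits 0 (0, 0)],
   acc.2.1 ++ [PySem.List.pyGetD boundSplits 1 (0, 0)],
   acc.2.2 ++ [PySem.List.pyGetD boundSplits 2 (0, 0)])

def split_bounds (bounds : List (Int × Int)) (value : Int) :
    (List (Int × Int)) × (List (Int × Int)) × (List (Int × Int)) :=
  let stepSizes := bounds.map (fun b => pvCeilTrueDiv (b.2 - b.1) value)
  (PySem.List.pyRange 0 value 1).foldl (splitBoundsBody bounds stepSizes) ([], [], [])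

-- ===== PORT B =====
-- edges[-1] is pyGetD at -1 (edges is never empty); edges[1:] on a list is List.drop 1 (exact)
def splitAxis (bound : Int × Int) (value : Int) : List (Int × Int) :=
  let step := -(PySem.Int.floordiv (bound.1 - bound.2) value)
  let edges := (PySem.List.pyRange 0 value 1).foldl
    (fun es _ => es ++ [PySem.List.pyGetD es (-1) 0 + step]) [bound.1]
  edges.zip (edges.drop 1)

-- bounds[k] ported with pyGetD, exact under Pre_ (len(bounds) ≥ 3)
def split_bounds_alt (bounds : List (Int × Int)) (value : Int) :
    (List (Int × Int)) × (List (Int × Int)) × (List (Int × Int)) :=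
  (splitAxis (PySem.List.pyGetD bounds 0 (0, 0)) value,
   splitAxis (PySem.List.pyGetD bounds 1 (0, 0)) value,
   splitAxis (PySem.List.pyGetD bounds 2 (0, 0)) value)

-- ===== PRECONDITION & SPEC =====
-- Pre_ excludes value = 0 (A raises ZeroDivisionError) and bounds shorter than 3 entries
-- (A raises IndexError for positive value, and for non-positive value returns three empty
-- lists only because its loop never runs — a defensible corner B's per-axis indexing raises on).
def Pre_split_bounds (bounds : List (Int × Int)) (value : Int) : Prop :=
  3 ≤ bounds.length ∧ value ≠ 0
instance (bounds : List (Int × Int)) (value : Int) : Decidable (Pre_split_bounds bounds value) := by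
  unfold Pre_split_bounds; infer_instance

def pvWitness_split_bounds : (List (Int × Int)) × Int := ([(0, 10), (-4, 5), (2, 2)], 3)

def Spec_split_bounds (bounds : List (Int × Int)) (value : Int)
    (out : (List (Int × Int)) × (List (Int × Int)) × (List (Int × Int))) : Prop :=
  out = split_bounds_alt bounds value
instance (bounds : List (Int × Int)) (value : Int)
    (out : (List (Int × Int)) × (List (Int × Int)) × (List (Int × Int))) :
    Decidable (Spec_split_bounds bounds value out) := by unfold Spec_split_bounds; infer_instance

-- ===== CLAIM (what is proved, stated in full; the proofs are below) =====
def Claim_equal_split_bounds : Prop := ∀ (bounds : List (Int × Int)) (value : Int),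
  Dom_split_bounds bounds value → Pre_split_bounds bounds value →
  Spec_split_bounds bounds value (split_bounds bounds value)

-- ===== LEMMAS AND PROOFS =====

theorem pyGetD_cons_one {α : Type} (x0 x1 : α) (t : List α) (d : α) :
    PySem.List.pyGetD (x0 :: x1 :: t) 1 d = x1 := by
  rw [PySem.List.pyGetD_eq_getElem _ d (by omega)
    (by simp only [List.length_cons]; push_cast; omega)]
  rfl

theorem pyGetD_cons_two {α : Type} (x0 x1 x2 : α) (t : List α) (d : α) :
    PySem.List.pyGetD (x0 :: x1 :: x2 :: t) 2 d = x2 := by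
  rw [PySem.List.pyGetD_eq_getElem _ d (by omega)
    (by simp only [List.length_cons]; push_cast; omega)]
  rfl

-- the per-iteration value A appends for the axis bound b
def pvAxisStep (b : Int × Int) (v i : Int) : Int × Int :=
  (b.1 + i * pvCeilTrueDiv (b.2 - b.1) v,
   b.1 + i * pvCeilTrueDiv (b.2 - b.1) v + pvCeilTrueDiv (b.2 - b.1) v)

theorem splitBoundsBody_cons3 (b0 b1 b2 : Int × Int) (rest : List (Int × Int)) (v : Int)
    (acc : (List (Int × Int)) × (List (Int × Int)) × (List (Int × Int))) (i : Int) :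
    splitBoundsBody (b0 :: b1 :: b2 :: rest)
      ((b0 :: b1 :: b2 :: rest).map (fun b => pvCeilTrueDiv (b.2 - b.1) v)) acc i
    = (acc.1 ++ [pvAxisStep b0 v i], acc.2.1 ++ [pvAxisStep b1 v i],
       acc.2.2 ++ [pvAxisStep b2 v i]) := by
  simp [splitBoundsBody, pvAxisStep, PySem.List.enumerate_cons,
    PySem.List.pyGetD_zero_cons, pyGetD_cons_one, pyGetD_cons_two]

theorem foldl_body3 (b0 b1 b2 : Int × Int) (rest : List (Int × Int)) (v : Int)
    (l : List Int) (xs ys zs : List (Int × Int)) :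
    l.foldl (splitBoundsBody (b0 :: b1 :: b2 :: rest)
      ((b0 :: b1 :: b2 :: rest).map (fun b => pvCeilTrueDiv (b.2 - b.1) v))) (xs, ys, zs)
    = (xs ++ l.map (pvAxisStep b0 v), ys ++ l.map (pvAxisStep b1 v),
       zs ++ l.map (pvAxisStep b2 v)) := by
  induction l generalizing xs ys zs with
  | nil => simp
  | cons a t ih => rw [List.foldl_cons, splitBoundsBody_cons3, ih]; simp

-- one cursor step folded into the front of a range-indexed list
theorem cons_shift (c step : Int) (n : ℕ) :
    c :: (List.range (n + 1)).map (fun k : ℕ => c + step + (k : Int) * step)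
    = (List.range (n + 1 + 1)).map (fun k : ℕ => c + (k : Int) * step) := by
  apply List.ext_getElem
  · simp
  · intro i h1 h2
    cases i with
    | zero => simp
    | succ j =>
      simp only [List.getElem_cons_succ, List.getElem_map, List.getElem_range]
      push_cast
      ring

-- B's edge-building foldl, characterised: appending l.length cursor steps after any prefix
theorem foldl_edges {β : Type} (step : Int) (l : List β) (pre : List Int) (c : Int) :
    l.foldl (fun es _ => es ++ [PySem.List.pyGetD es (-1) 0 + step]) (pre ++ [c])
    = pre ++ (List.range (l.length + 1)).map (fun k : ℕ => c + (k : Int) * step) := by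
  induction l generalizing pre c with
  | nil => simp
  | cons a t ih =>
    rw [List.foldl_cons, PySem.List.pyGetD_neg_one_append_singleton,
      ih (pre ++ [c]) (c + step), List.append_assoc, List.singleton_append,
      List.length_cons, cons_shift]

-- pairing consecutive entries of a range-indexed list with zip-of-tail
theorem zip_shift {α : Type} (f : ℕ → α) (n : ℕ) :
    ((List.range (n + 1)).map f).zip (((List.range (n + 1)).map f).drop 1)
    = (List.range n).map (fun k => (f k, f (k + 1))) := by
  apply List.ext_getElem
  · simp
  · intro i h1 h2
    simp only [List.getElem_zip, List.getElem_drop, List.getElem_map, List.getElem_range,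
      Nat.add_comm]

theorem splitAxis_eq_map (b : Int × Int) (v : Int) :
    splitAxis b v = (PySem.List.pyRange 0 v 1).map (pvAxisStep b v) := by
  unfold splitAxis
  have hf : (fun (es : List Int) (_ : Int) =>
        es ++ [PySem.List.pyGetD es (-1) 0 + -(PySem.Int.floordiv (b.1 - b.2) v)])
      = (fun es _ => es ++ [PySem.List.pyGetD es (-1) 0 + pvCeilTrueDiv (b.2 - b.1) v]) := by
    funext es i
    have : -(PySem.Int.floordiv (b.1 - b.2) v) = pvCeilTrueDiv (b.2 - b.1) v := by
      simp only [pvCeilTrueDiv, neg_sub]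
    rw [this]
  simp only [hf]
  rw [show ([b.1] : List Int) = [] ++ [b.1] from rfl,
    foldl_edges (pvCeilTrueDiv (b.2 - b.1) v) (PySem.List.pyRange 0 v 1) [] b.1,
    List.nil_append, zip_shift (fun k : ℕ => b.1 + (k : Int) * pvCeilTrueDiv (b.2 - b.1) v),
    PySem.List.length_pyRange_one, PySem.List.pyRange_one, List.map_map]
  apply List.map_congr_left
  intro k _
  simp only [Function.comp_apply, pvAxisStep, Prod.mk.injEq]
  constructor <;> (push_cast; ring)

-- ===== VERDICT (by name: the statement is the Claim_ definition above) =====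
theorem split_bounds_spec : Claim_equal_split_bounds := by
  intro bounds value _ hpre
  obtain ⟨hlen, _⟩ := hpre
  match bounds, hlen with
  | b0 :: b1 :: b2 :: rest, _ =>
    show split_bounds _ _ = split_bounds_alt _ _
    rw [split_bounds, split_bounds_alt]
    rw [foldl_body3, splitAxis_eq_map, splitAxis_eq_map, splitAxis_eq_map]
    simp [PySem.List.pyGetD_zero_cons, pyGetD_cons_one, pyGetD_cons_two]
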